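-- pv_equiv track=rewrite | github.com/alauracarlotta/welcome_to_the_django | welcome_to_the_django/welcome_to_the_django_39-desafios-pythonicos/09_front_x.py | front_x
-- ===== SOURCE A (Python) =====
-- def front_x(list_value):
--     # +++ SUA SOLUÇÃO +++
--     init_letter_x = []
--     not_initialized_x = []
--     for value in list_value:
--         if value[0] == 'x' or value[0] == 'X':
--             init_letter_x.append(value)
--         else:
--             not_initialized_x.append(value)
--         init_letter_x = sorted(init_letter_x)
--         not_initialized_x = sorted(not_initialized_x)
--     return init_letter_x + not_initialized_x
-- ===== SOURCE B (Python) =====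
-- def front_x(list_value):
--     # One stable sort with a composite key: x/X-prefixed strings (False key) first,
--     # each group in lexicographic order.
--     return sorted(list_value, key=lambda v: (v[0] not in 'xX', v))
-- ===== Notes on version B (the rewrite author's own statement) =====
-- stated objective: faster
-- what changed: Replaced A's two-bucket partition that re-sorts both buckets on every loop iteration with a single stable sort using the composite key (v[0] not in 'xX', v), so the x/X-prefixed group comes first and each group is in lexicographic order.
import Mathlib
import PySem

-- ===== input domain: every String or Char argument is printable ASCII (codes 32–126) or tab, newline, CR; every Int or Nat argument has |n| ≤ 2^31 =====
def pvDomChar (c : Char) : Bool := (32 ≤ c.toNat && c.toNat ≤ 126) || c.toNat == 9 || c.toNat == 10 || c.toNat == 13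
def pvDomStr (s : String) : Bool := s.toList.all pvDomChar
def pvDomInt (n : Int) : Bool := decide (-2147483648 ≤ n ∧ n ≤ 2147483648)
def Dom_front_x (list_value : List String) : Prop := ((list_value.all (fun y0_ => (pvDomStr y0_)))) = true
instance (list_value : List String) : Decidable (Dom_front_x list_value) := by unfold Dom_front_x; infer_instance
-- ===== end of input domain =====

-- B replaces A's two-bucket partition (which re-sorts both buckets on every iteration) by one
-- stable sort with a composite key (group flag, string); objective: faster/simpler.

-- ===== PORT A =====
-- A's loop body: append to the matching bucket, then re-sort BOTH buckets (as A does each iteration)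
def stepA (st : List String × List String) (value : String) : List String × List String :=
  let st' :=
    if PySem.Str.pyGet? value 0 == some 'x' || PySem.Str.pyGet? value 0 == some 'X'
    then (st.1 ++ [value], st.2)
    else (st.1, st.2 ++ [value])
  (PySem.List.sorted st'.1 (fun x => x), PySem.List.sorted st'.2 (fun x => x))

def front_x (list_value : List String) : List String :=
  let p := list_value.foldl stepA ([], [])
  p.1 ++ p.2

-- ===== PORT B =====
-- B's first key component `v[0] not in 'xX'` (False = 0 sorts first); none (empty string,
-- where Python raises IndexError) is outside Pre_ below
def bKey1 (v : String) : Nat :=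
  match PySem.Str.pyGet? v 0 with
  | some c => if ("xX".toList.contains c) then 0 else 1
  | none => 1

def front_x_alt (list_value : List String) : List String :=
  PySem.List.sorted2 list_value bKey1 (fun v => v) false

-- ===== PRECONDITION & SPEC =====
-- Both Pythons evaluate value[0] on every element, so they raise IndexError when the list
-- contains an empty string; Pre_ excludes exactly those inputs.
def Pre_front_x (list_value : List String) : Prop := ∀ s ∈ list_value, s ≠ ""
instance (list_value : List String) : Decidable (Pre_front_x list_value) := by unfold Pre_front_x; infer_instance
def pvWitness_front_x : List String := (["xa", "b", "Xc"])

def Spec_front_x (list_value : List String) (out : List String) : Prop := out = front_x_alt list_value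
instance (list_value : List String) (out : List String) : Decidable (Spec_front_x list_value out) := by unfold Spec_front_x; infer_instance

-- ===== CLAIM (what is proved, stated in full; the proofs are below) =====
def Claim_equal_front_x : Prop := ∀ (list_value : List String), Dom_front_x list_value → Pre_front_x list_value → Spec_front_x list_value (front_x list_value)

-- ===== LEMMAS AND PROOFS =====

-- the group test, in the shape of A's condition
def pxP (v : String) : Bool :=
  PySem.Str.pyGet? v 0 == some 'x' || PySem.Str.pyGet? v 0 == some 'X'

-- B's first key component agrees with A's group test
lemma bKey1_eq_ite (v : String) : bKey1 v = if pxP v then 0 else 1 := by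
  cases h : PySem.List.pyGet? v.toList 0 with
  | none => simp [bKey1, pxP, h]
  | some c => simp [bKey1, pxP, h]

-- re-sorting an already-sorted bucket with one element appended sorts the whole bucket
lemma resort (a : List String) (v : String) :
    PySem.List.sorted ((PySem.List.sorted a (fun x => x)) ++ [v]) (fun x => x)
      = PySem.List.sorted (a ++ [v]) (fun x => x) :=
  PySem.List.sorted_eq_sorted_of_perm _ _ _ (fun _ _ h => h)
    ((PySem.List.sorted_perm a (fun x => x) false).append_right [v])

-- A's loop invariant: both buckets are the sorted filtered prefix
lemma loopA (t : List String) (a b : List String) :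
    t.foldl stepA (PySem.List.sorted a (fun x => x), PySem.List.sorted b (fun x => x))
      = (PySem.List.sorted (a ++ t.filter pxP) (fun x => x),
         PySem.List.sorted (b ++ t.filter (fun v => !pxP v)) (fun x => x)) := by
  induction t generalizing a b with
  | nil => simp only [List.foldl_nil, List.filter_nil, List.append_nil]
  | cons v t ih =>
    simp only [List.foldl_cons]
    have hstep : stepA (PySem.List.sorted a (fun x => x), PySem.List.sorted b (fun x => x)) v
        = if pxP v
          then (PySem.List.sorted (a ++ [v]) (fun x => x), PySem.List.sorted b (fun x => x))
          else (PySem.List.sorted a (fun x => x), PySem.List.sorted (b ++ [v]) (fun x => x)) := by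
      unfold stepA pxP
      split_ifs with h <;> simp_all [resort, PySem.List.sorted_sorted]
    rw [hstep]
    by_cases h : pxP v
    · rw [if_pos h, ih (a ++ [v]) b]
      simp [h, List.append_assoc]
    · rw [if_neg h, ih a (b ++ [v])]
      simp [h, List.append_assoc]

-- B's composite key, as a single key into the lexicographic product order
def pxK (v : String) : Lex (Nat × String) := toLex (bKey1 v, v)

-- B's tuple-key sort is the single-key sort under the lexicographic key
lemma sorted2_eq_sorted_lex (xs : List String) :
    PySem.List.sorted2 xs bKey1 (fun v => v) false = PySem.List.sorted xs pxK := by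
  have hcmp : (fun (a b : String) =>
      decide (bKey1 a < bKey1 b) || (!decide (bKey1 b < bKey1 a) && decide (a < b)))
      = fun a b => decide (pxK a < pxK b) := by
    funext a b
    rcases lt_trichotomy (bKey1 a) (bKey1 b) with h | h | h
    · simp [pxK, Prod.Lex.lt_iff, h]
    · simp [pxK, Prod.Lex.lt_iff, h]
    · simp only [pxK, Prod.Lex.lt_iff]
      have h1 : ¬ (bKey1 a < bKey1 b) := lt_asymm h
      have h2 : bKey1 a ≠ bKey1 b := ne_of_gt h
      simp [h1, h2]
      exact fun h3 => absurd (lt_of_lt_of_le h h3) (lt_irrefl _)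
  rw [PySem.List.sorted_eq_foldl_insertBy]
  simp only [PySem.List.sorted2, Bool.false_eq_true, if_false, hcmp]

lemma pxK_le_iff (a b : String) : pxK a ≤ pxK b ↔ bKey1 a < bKey1 b ∨ (bKey1 a = bKey1 b ∧ a ≤ b) := by
  simp [pxK, Prod.Lex.le_iff]

-- the lexicographic-key sort is: x-group sorted, then the others sorted
lemma sorted_lex_split (xs : List String) :
    PySem.List.sorted xs pxK
      = PySem.List.sorted (xs.filter pxP) (fun x => x)
        ++ PySem.List.sorted (xs.filter (fun v => !pxP v)) (fun x => x) := by
  apply List.Perm.eq_of_pairwise (le := fun a b => pxK a ≤ pxK b)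
  · intro a b _ _ h1 h2
    have h3 : pxK a = pxK b := le_antisymm h1 h2
    have := congrArg (fun p => (ofLex p).2) h3
    simpa using this
  · exact PySem.List.sorted_pairwise xs pxK
  · rw [List.pairwise_append]
    refine ⟨?_, ?_, ?_⟩
    · refine (PySem.List.sorted_pairwise _ _).imp_of_mem ?_
      intro a b ha hb hab
      have ha' : pxP a = true := (List.mem_filter.1 ((PySem.List.mem_sorted _ _ _ _).1 ha)).2
      have hb' : pxP b = true := (List.mem_filter.1 ((PySem.List.mem_sorted _ _ _ _).1 hb)).2
      rw [pxK_le_iff]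
      right
      constructor
      · rw [bKey1_eq_ite, bKey1_eq_ite, ha', hb']
      · exact hab
    · refine (PySem.List.sorted_pairwise _ _).imp_of_mem ?_
      intro a b ha hb hab
      have ha' : pxP a = false := by
        have := (List.mem_filter.1 ((PySem.List.mem_sorted _ _ _ _).1 ha)).2
        simpa using this
      have hb' : pxP b = false := by
        have := (List.mem_filter.1 ((PySem.List.mem_sorted _ _ _ _).1 hb)).2
        simpa using this
      rw [pxK_le_iff]
      right
      constructor
      · rw [bKey1_eq_ite, bKey1_eq_ite, ha', hb']
      · exact hab
    · intro a ha b hb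
      have ha' : pxP a = true := (List.mem_filter.1 ((PySem.List.mem_sorted _ _ _ _).1 ha)).2
      have hb' : pxP b = false := by
        have := (List.mem_filter.1 ((PySem.List.mem_sorted _ _ _ _).1 hb)).2
        simpa using this
      rw [pxK_le_iff]
      left
      rw [bKey1_eq_ite, bKey1_eq_ite, ha', hb']
      decide
  · exact ((PySem.List.sorted_perm xs pxK false).trans
      (List.filter_append_perm pxP xs).symm).trans
      (((PySem.List.sorted_perm (xs.filter pxP) (fun x => x) false).append
        (PySem.List.sorted_perm (xs.filter (fun v => !pxP v)) (fun x => x) false)).symm)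

-- ===== VERDICT (by name: the statement is the Claim_ definition above) =====
theorem front_x_spec : Claim_equal_front_x := by
  intro list_value _ _
  unfold Spec_front_x front_x front_x_alt
  have h0 : ((PySem.List.sorted ([] : List String) (fun x => x)),
      (PySem.List.sorted ([] : List String) (fun x => x)))
      = (([] : List String), ([] : List String)) := rfl
  have h := loopA list_value [] []
  rw [h0] at h
  simp only [List.nil_append] at h
  rw [h, sorted2_eq_sorted_lex, sorted_lex_split]
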